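-- pv_equiv track=rewrite | github.com/sahithi-sss/Numerical-Optimization | Netwon_interpolation_mtds_1/newtons_fwd_diff.py | fwd_diff_table
-- ===== SOURCE A (Python) =====
-- def fwd_diff_table(Y):
--     n = len(Y)
--     F = [[0] * n for _ in range(n)]
--
--     for i in range(n):
--         F[i][0] = Y[i]
--
--     for j in range(1,n):
--         for i in range(n-j):
--             F[i][j] = F[i+1][j-1] - F[i][j-1]
--
--     return [F[0][i] for i in range(n)]
-- ===== SOURCE B (Python) =====
-- def fwd_diff_table(Y):
--     n = len(Y)
--     out = []
--     for k in range(n):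
--         s = 0
--         c = 1  # binomial coefficient C(k, i), updated multiplicatively
--         for i in range(k + 1):
--             s += (-1) ** (k - i) * c * Y[i]
--             c = c * (k - i) // (i + 1)
--         out.append(s)
--     return out
-- ===== Notes on version B (the rewrite author's own statement) =====
-- stated objective: alternative
-- what changed: B computes each output entry directly by the binomial closed form (the k-th forward difference at the start equals the alternating-sign binomial-weighted sum of the first k+1 values), maintaining a rolling binomial coefficient and building no difference table at all.
import Mathlib
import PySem

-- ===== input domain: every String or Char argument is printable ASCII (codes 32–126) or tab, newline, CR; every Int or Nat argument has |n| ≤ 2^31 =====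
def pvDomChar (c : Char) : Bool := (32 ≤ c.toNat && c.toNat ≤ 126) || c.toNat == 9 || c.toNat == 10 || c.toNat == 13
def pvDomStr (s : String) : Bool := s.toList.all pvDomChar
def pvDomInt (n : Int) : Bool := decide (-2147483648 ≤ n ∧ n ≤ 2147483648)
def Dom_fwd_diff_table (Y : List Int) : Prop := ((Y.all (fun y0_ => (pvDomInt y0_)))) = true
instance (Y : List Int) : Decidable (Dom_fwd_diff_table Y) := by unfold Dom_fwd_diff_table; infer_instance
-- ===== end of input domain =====

-- B computes each entry by the binomial closed form Δ^k Y[0] = Σ_i (-1)^(k-i) C(k,i) Y[i]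
-- with a rolling binomial coefficient, building no difference table at all; same return value proved.

-- ===== PORT A =====
-- matrix cell read/write; every access A makes is in range, so getD/set are exact here
def pvGet2 (F : List (List Int)) (i j : Nat) : Int := (F.getD i []).getD j 0
def pvSet2 (F : List (List Int)) (i j : Nat) (v : Int) : List (List Int) :=
  F.set i ((F.getD i []).set j v)

def fwd_diff_table (Y : List Int) : List Int :=
  let n := Y.length
  let F0 : List (List Int) := (List.range n).map (fun _ => List.replicate n 0)
  -- for i in range(n): F[i][0] = Y[i]
  let F1 := (List.range n).foldl (fun F i => pvSet2 F i 0 (Y.getD i 0)) F0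
  -- for j in range(1,n): for i in range(n-j): F[i][j] = F[i+1][j-1] - F[i][j-1]
  let F2 := (List.range' 1 (n - 1)).foldl (fun F j =>
      (List.range (n - j)).foldl
        (fun F i => pvSet2 F i j (pvGet2 F (i+1) (j-1) - pvGet2 F i (j-1))) F) F1
  (List.range n).map (fun i => pvGet2 F2 0 i)

-- ===== PORT B =====
-- for k in range(n): s = 0; c = 1; for i in range(k+1): s += (-1)**(k-i)*c*Y[i]; c = c*(k-i)//(i+1); out.append(s)
def fwd_diff_table_alt (Y : List Int) : List Int :=
  (List.range Y.length).foldl (fun out k =>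
    out ++ [((List.range (k+1)).foldl
      (fun (sc : Int × Int) i =>
        (sc.1 + (-1:Int) ^ (k - i) * sc.2 * Y.getD i 0,
         PySem.Int.floordiv (sc.2 * ((k:Int) - (i:Int))) ((i:Int)+1)))
      ((0:Int), (1:Int))).1]) []

-- ===== PRECONDITION & SPEC =====
def Spec_fwd_diff_table (Y : List Int) (out : List Int) : Prop := out = fwd_diff_table_alt Y
instance (Y : List Int) (out : List Int) : Decidable (Spec_fwd_diff_table Y out) := by unfold Spec_fwd_diff_table; infer_instance

-- ===== CLAIM (what is proved, stated in full; the proofs are below) =====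
def Claim_equal_fwd_diff_table : Prop := ∀ (Y : List Int), Dom_fwd_diff_table Y → Spec_fwd_diff_table Y (fwd_diff_table Y)

-- ===== LEMMAS AND PROOFS =====

-- the one-level forward difference of a list (specification device only)
def pvDiff (cur : List Int) : List Int :=
  (List.range (cur.length - 1)).map (fun i => cur.getD (i+1) 0 - cur.getD i 0)

theorem pvDiff_length (cur : List Int) : (pvDiff cur).length = cur.length - 1 := by
  simp [pvDiff]

-- iterated differencing: level k of the difference table
def pvDIter (k : Nat) (Y : List Int) : List Int :=
  match k with
  | 0 => Y
  | k + 1 => pvDIter k (pvDiff Y)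

theorem pvDIter_length (k : Nat) (Y : List Int) : (pvDIter k Y).length = Y.length - k := by
  induction k generalizing Y with
  | zero => simp [pvDIter]
  | succ k ih => simp [pvDIter, ih, pvDiff_length]; omega

theorem pvDIter_diff (k : Nat) (Y : List Int) :
    pvDIter k (pvDiff Y) = pvDiff (pvDIter k Y) := by
  induction k generalizing Y with
  | zero => simp [pvDIter]
  | succ k ih => simp [pvDIter, ih]

theorem pvDiff_getD (cur : List Int) (i : Nat) (h : i + 1 < cur.length) :
    (pvDiff cur).getD i 0 = cur.getD (i+1) 0 - cur.getD i 0 := by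
  simp [pvDiff, List.getD_eq_getElem?_getD, (by omega : i < cur.length - 1)]

-- unsigned binomial sum and the signed one B computes
def pvT (Y : List Int) (k j : Nat) : Int :=
  ∑ i ∈ Finset.range (k+1), (-1:Int)^i * (k.choose i : Int) * Y.getD (j+i) 0

def pvS (Y : List Int) (k j : Nat) : Int :=
  ∑ i ∈ Finset.range (k+1), (-1:Int)^(k-i) * (k.choose i : Int) * Y.getD (j+i) 0

theorem pvS_eq_T (Y : List Int) (k j : Nat) : pvS Y k j = (-1:Int)^k * pvT Y k j := by
  unfold pvS pvT
  rw [Finset.mul_sum]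
  apply Finset.sum_congr rfl
  intro i hi
  rw [Finset.mem_range] at hi
  have hpow : (-1:Int)^(k-i) = (-1:Int)^k * (-1:Int)^i := by
    have h1 : (-1:Int)^(k-i) * (-1:Int)^i = (-1:Int)^k := by
      rw [← pow_add]; congr 1; omega
    have h2 : (-1:Int)^i * (-1:Int)^i = 1 := by
      rw [← pow_add, ← two_mul, pow_mul]; norm_num
    calc (-1:Int)^(k-i) = (-1:Int)^(k-i) * ((-1:Int)^i * (-1:Int)^i) := by rw [h2, mul_one]
      _ = ((-1:Int)^(k-i) * (-1:Int)^i) * (-1:Int)^i := by ring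
      _ = (-1:Int)^k * (-1:Int)^i := by rw [h1]
  rw [hpow]; ring

-- Pascal recurrence for the unsigned sum
theorem pvT_succ (Y : List Int) (k j : Nat) :
    pvT Y (k+1) j = pvT Y k j - pvT Y k (j+1) := by
  have hpeel : pvT Y (k+1) j
      = (∑ i ∈ Finset.range (k+1), (-1:Int)^(i+1) * (((k+1).choose (i+1) : Nat) : Int) * Y.getD (j+(i+1)) 0)
        + Y.getD j 0 := by
    unfold pvT
    rw [Finset.sum_range_succ' (fun i => (-1:Int)^i * ((k+1).choose i : Int) * Y.getD (j+i) 0) (k+1)]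
    norm_num
  have hsplit : ∀ i ∈ Finset.range (k+1),
      (-1:Int)^(i+1) * (((k+1).choose (i+1) : Nat) : Int) * Y.getD (j+(i+1)) 0
      = (-1:Int)^(i+1) * (k.choose i : Int) * Y.getD (j+(i+1)) 0
        + (-1:Int)^(i+1) * (k.choose (i+1) : Int) * Y.getD (j+(i+1)) 0 := by
    intro i _
    rw [Nat.choose_succ_succ]
    push_cast
    ring
  rw [hpeel, Finset.sum_congr rfl hsplit, Finset.sum_add_distrib]
  have h1 : (∑ i ∈ Finset.range (k+1), (-1:Int)^(i+1) * (k.choose i : Int) * Y.getD (j+(i+1)) 0)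
      = -pvT Y k (j+1) := by
    unfold pvT
    rw [← Finset.sum_neg_distrib]
    apply Finset.sum_congr rfl
    intro i _
    have he : j + 1 + i = j + (i + 1) := by omega
    rw [he]; ring
  have h2 : (∑ i ∈ Finset.range (k+1), (-1:Int)^(i+1) * (k.choose (i+1) : Int) * Y.getD (j+(i+1)) 0)
      = pvT Y k j - Y.getD j 0 := by
    have hT : pvT Y k j
        = (∑ i ∈ Finset.range k, (-1:Int)^(i+1) * (k.choose (i+1) : Int) * Y.getD (j+(i+1)) 0)
          + Y.getD j 0 := by
      unfold pvT
      rw [Finset.sum_range_succ' (fun i => (-1:Int)^i * (k.choose i : Int) * Y.getD (j+i) 0) k]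
      norm_num
    rw [Finset.sum_range_succ, hT]
    simp [Nat.choose_succ_self]
  rw [h1, h2]
  ring

theorem pvS_succ (Y : List Int) (k j : Nat) :
    pvS Y (k+1) j = pvS Y k (j+1) - pvS Y k j := by
  rw [pvS_eq_T, pvS_eq_T, pvS_eq_T, pvT_succ]
  ring

-- the difference table's entries are the signed binomial sums
theorem dIter_eq_S (Y : List Int) (k j : Nat) (h : j + k < Y.length) :
    (pvDIter k Y).getD j 0 = pvS Y k j := by
  induction k generalizing j with
  | zero => simp [pvDIter, pvS]
  | succ k ih =>
    have hstep : pvDIter (k+1) Y = pvDiff (pvDIter k Y) := by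
      simp only [pvDIter, pvDIter_diff]
    rw [hstep, pvDiff_getD _ j (by rw [pvDIter_length]; omega),
      ih (j+1) (by omega), ih j (by omega), pvS_succ]

-- exact rolling-coefficient update: c*(k-i) // (i+1) moves C(k,i) to C(k,i+1)
theorem choose_step (k i : Nat) :
    PySem.Int.floordiv ((k.choose i : Int) * ((k:Int) - (i:Int))) ((i:Int)+1)
      = (k.choose (i+1) : Int) := by
  by_cases hik : i ≤ k
  · have hc : (k.choose i : Int) * ((k:Int) - (i:Int)) = ((k.choose i * (k - i) : Nat) : Int) := by
      push_cast [hik]; ring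
    rw [hc]
    have : ((i:Int)+1) = (((i+1 : Nat)) : Int) := by push_cast; ring
    rw [this, PySem.Int.floordiv_natCast]
    congr 1
    rw [← Nat.choose_succ_right_eq]
    exact Nat.mul_div_cancel _ (by omega)
  · have h1 : k.choose i = 0 := Nat.choose_eq_zero_of_lt (by omega)
    have h2 : k.choose (i+1) = 0 := Nat.choose_eq_zero_of_lt (by omega)
    rw [h1, h2]
    simp [PySem.Int.floordiv]

-- inner loop invariant: after range m, s holds the partial signed sum and c holds C(k,m)
theorem inner_fold (Y : List Int) (k m : Nat) :
    (List.range m).foldl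
      (fun (sc : Int × Int) i =>
        (sc.1 + (-1:Int) ^ (k - i) * sc.2 * Y.getD i 0,
         PySem.Int.floordiv (sc.2 * ((k:Int) - (i:Int))) ((i:Int)+1)))
      ((0:Int), (1:Int))
    = (∑ i ∈ Finset.range m, (-1:Int)^(k-i) * (k.choose i : Int) * Y.getD i 0,
       (k.choose m : Int)) := by
  induction m with
  | zero => simp
  | succ m ih =>
    rw [List.range_succ, List.foldl_append, ih]
    simp only [List.foldl_cons, List.foldl_nil, Finset.sum_range_succ]
    exact Prod.ext rfl (choose_step k m)

-- the append-accumulating outer fold is a map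
theorem foldl_append_map (g : Nat → Int) (l : List Nat) (acc : List Int) :
    l.foldl (fun out k => out ++ [g k]) acc = acc ++ l.map g := by
  induction l generalizing acc with
  | nil => simp
  | cons a t ih => simp [ih]

theorem alt_eq_map (Y : List Int) :
    fwd_diff_table_alt Y = (List.range Y.length).map (fun k => pvS Y k 0) := by
  unfold fwd_diff_table_alt
  simp only [inner_fold]
  have hfun : (fun (out : List Int) (k : Nat) =>
      out ++ [(((∑ i ∈ Finset.range (k+1), (-1:Int)^(k-i) * (k.choose i : Int) * Y.getD i 0,
          (k.choose (k+1) : Int)) : Int × Int)).1])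
      = (fun (out : List Int) (k : Nat) => out ++ [pvS Y k 0]) := by
    funext out k
    unfold pvS
    simp
  rw [hfun, foldl_append_map]
  simp

-- ===== A-side proof (same as a plain table-filling argument) =====
def pvShape (n : Nat) (F : List (List Int)) : Prop :=
  F.length = n ∧ ∀ r ∈ F, r.length = n

theorem pvShape_set2 {n : Nat} {F : List (List Int)} (hF : pvShape n F) (i j : Nat) (v : Int) :
    pvShape n (pvSet2 F i j v) := by
  obtain ⟨h1, h2⟩ := hF
  refine ⟨by simp [pvSet2, h1], ?_⟩
  intro r hr
  by_cases hi : i < F.length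
  · rcases List.mem_or_eq_of_mem_set hr with h | h
    · exact h2 r h
    · subst h; rw [List.length_set]
      have hg : F.getD i [] = F[i] := by
        simp [List.getD_eq_getElem?_getD, List.getElem?_eq_getElem hi]
      rw [hg]; exact h2 _ (List.getElem_mem hi)
  · rw [pvSet2, List.set_eq_of_length_le (by omega)] at hr; exact h2 r hr

theorem pvGet2_set2_ne (F : List (List Int)) (i j i' j' : Nat) (v : Int)
    (h : i ≠ i' ∨ j ≠ j') : pvGet2 (pvSet2 F i j v) i' j' = pvGet2 F i' j' := by
  unfold pvGet2 pvSet2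
  simp only [List.getD_eq_getElem?_getD, List.getElem?_set]
  rcases h with h | h
  · simp [h]
  · by_cases hi : i = i'
    · subst hi
      by_cases hlen : i < F.length
      · simp [hlen, List.getElem?_set_ne h]
      · simp [hlen]
    · simp [hi]

theorem pvGet2_set2_self {n : Nat} {F : List (List Int)} (hF : pvShape n F) (i j : Nat)
    (hi : i < n) (hj : j < n) (v : Int) : pvGet2 (pvSet2 F i j v) i j = v := by
  obtain ⟨h1, h2⟩ := hF
  have hiF : i < F.length := by omega
  have hrow : (F[i]?.getD ([] : List Int)).length = n := by
    rw [List.getElem?_eq_getElem hiF]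
    exact h2 _ (List.getElem_mem hiF)
  unfold pvGet2 pvSet2
  simp only [List.getD_eq_getElem?_getD]
  rw [List.getElem?_set_self hiF]
  simp only [Option.getD_some]
  rw [List.getElem?_set_self (by omega : j < (F[i]?.getD ([] : List Int)).length)]
  rfl

theorem pvShape_F0 (n : Nat) :
    pvShape n ((List.range n).map (fun _ => List.replicate n (0:Int))) := by
  refine ⟨by simp, ?_⟩
  intro r hr
  obtain ⟨x, -, rfl⟩ := List.mem_map.mp hr
  simp

-- phase 1: after the first loop, the shape is intact and column 0 holds Y
theorem phase1_inv (Y : List Int) (n : Nat) (hn : n = Y.length) (m : Nat) (hm : m ≤ n) :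
    pvShape n ((List.range m).foldl (fun F i => pvSet2 F i 0 (Y.getD i 0))
      ((List.range n).map (fun _ => List.replicate n 0))) ∧
    ∀ i < m, pvGet2 ((List.range m).foldl (fun F i => pvSet2 F i 0 (Y.getD i 0))
      ((List.range n).map (fun _ => List.replicate n 0))) i 0 = Y.getD i 0 := by
  induction m with
  | zero => exact ⟨pvShape_F0 n, fun i hi => absurd hi (Nat.not_lt_zero i)⟩
  | succ m ih =>
    obtain ⟨hsh, hcol⟩ := ih (by omega)
    rw [List.range_succ, List.foldl_append]
    refine ⟨pvShape_set2 hsh _ _ _, ?_⟩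
    intro i hi
    by_cases h : i = m
    · rw [h]
      simp only [List.foldl_cons, List.foldl_nil]
      exact pvGet2_set2_self hsh m 0 (by omega) (by omega) _
    · simp only [List.foldl_cons, List.foldl_nil]
      rw [pvGet2_set2_ne _ _ _ _ _ _ (Or.inl (Ne.symm h))]
      exact hcol i (by omega)

-- phase 2 inner loop: writes column j from column j-1, leaving columns ≤ j-1 intact
theorem inner_inv (Y : List Int) (n : Nat) (hn : n = Y.length) (j : Nat)
    (hj1 : 1 ≤ j) (hjn : j ≤ n - 1) (F : List (List Int)) (hF : pvShape n F)
    (hcols : ∀ c ≤ j - 1, ∀ i < n - c, pvGet2 F i c = (pvDIter c Y).getD i 0)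
    (m : Nat) (hm : m ≤ n - j) :
    pvShape n ((List.range m).foldl
        (fun F i => pvSet2 F i j (pvGet2 F (i+1) (j-1) - pvGet2 F i (j-1))) F) ∧
    (∀ c ≤ j - 1, ∀ i < n - c, pvGet2 ((List.range m).foldl
        (fun F i => pvSet2 F i j (pvGet2 F (i+1) (j-1) - pvGet2 F i (j-1))) F) i c
        = (pvDIter c Y).getD i 0) ∧
    ∀ i < m, pvGet2 ((List.range m).foldl
        (fun F i => pvSet2 F i j (pvGet2 F (i+1) (j-1) - pvGet2 F i (j-1))) F) i j
        = (pvDIter j Y).getD i 0 := by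
  induction m with
  | zero => exact ⟨hF, hcols, fun i hi => absurd hi (Nat.not_lt_zero i)⟩
  | succ m ih =>
    obtain ⟨hsh, hold, hnew⟩ := ih (by omega)
    rw [List.range_succ, List.foldl_append]
    simp only [List.foldl_cons, List.foldl_nil]
    refine ⟨pvShape_set2 hsh _ _ _, ?_, ?_⟩
    · intro c hc i hi
      rw [pvGet2_set2_ne _ _ _ _ _ _ (Or.inr (by omega))]
      exact hold c hc i hi
    · intro i hi
      by_cases h : i = m
      · rw [h]
        rw [pvGet2_set2_self hsh m j (by omega) (by omega) _]
        have h1 : pvGet2 _ (m+1) (j-1) = (pvDIter (j-1) Y).getD (m+1) 0 :=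
          hold (j-1) (le_refl _) (m+1) (by omega)
        have h2 : pvGet2 _ m (j-1) = (pvDIter (j-1) Y).getD m 0 :=
          hold (j-1) (le_refl _) m (by omega)
        rw [h1, h2]
        have hlen : (pvDIter (j-1) Y).length = n - (j-1) := by rw [pvDIter_length, hn]
        have hstep : pvDIter j Y = pvDiff (pvDIter (j-1) Y) := by
          obtain ⟨j', rfl⟩ : ∃ j', j = j' + 1 := ⟨j - 1, by omega⟩
          simp only [Nat.add_sub_cancel, pvDIter, pvDIter_diff]
        rw [hstep, pvDiff_getD _ m (by omega)]
      · rw [pvGet2_set2_ne _ _ _ _ _ _ (Or.inl (Ne.symm h))]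
        exact hnew i (by omega)

-- phase 2 outer loop: after columns 1..k, all columns ≤ k hold the difference levels
theorem outer_inv (Y : List Int) (n : Nat) (hn : n = Y.length) (k : Nat) (hk : k ≤ n - 1) :
    pvShape n ((List.range' 1 k).foldl (fun F j =>
        (List.range (n - j)).foldl
          (fun F i => pvSet2 F i j (pvGet2 F (i+1) (j-1) - pvGet2 F i (j-1))) F)
      ((List.range n).foldl (fun F i => pvSet2 F i 0 (Y.getD i 0))
        ((List.range n).map (fun _ => List.replicate n 0)))) ∧
    ∀ c ≤ k, ∀ i < n - c, pvGet2 ((List.range' 1 k).foldl (fun F j =>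
        (List.range (n - j)).foldl
          (fun F i => pvSet2 F i j (pvGet2 F (i+1) (j-1) - pvGet2 F i (j-1))) F)
      ((List.range n).foldl (fun F i => pvSet2 F i 0 (Y.getD i 0))
        ((List.range n).map (fun _ => List.replicate n 0)))) i c
      = (pvDIter c Y).getD i 0 := by
  induction k with
  | zero =>
    obtain ⟨hsh, hcol⟩ := phase1_inv Y n hn n (le_refl n)
    refine ⟨hsh, ?_⟩
    intro c hc i hi
    interval_cases c
    simpa [pvDIter] using hcol i (by omega)
  | succ k ih =>
    obtain ⟨hsh, hcols⟩ := ih (by omega)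
    rw [List.range'_concat, List.foldl_append]
    simp only [List.foldl_cons, List.foldl_nil, Nat.one_mul,
      show 1 + k = k + 1 from Nat.add_comm 1 k]
    obtain ⟨hsh', hold', hnew'⟩ := inner_inv Y n hn (k + 1) (by omega) (by omega) _ hsh
      (by intro c hc i hi; exact hcols c (by omega) i hi) (n - (k + 1)) (le_refl _)
    refine ⟨hsh', ?_⟩
    intro c hc i hi
    by_cases h : c = k + 1
    · subst h
      exact hnew' i (by omega)
    · exact hold' c (by omega) i hi

-- ===== VERDICT (by name: the statement is the Claim_ definition above) =====
theorem fwd_diff_table_spec : Claim_equal_fwd_diff_table := by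
  intro Y _
  show fwd_diff_table Y = fwd_diff_table_alt Y
  rw [alt_eq_map]
  unfold fwd_diff_table
  simp only []
  by_cases h0 : Y.length = 0
  · simp [h0]
  · apply List.map_congr_left
    intro a ha
    rw [List.mem_range] at ha
    rw [(outer_inv Y Y.length rfl (Y.length - 1) (le_refl _)).2 a (by omega) 0 (by omega)]
    exact dIter_eq_S Y a 0 (by omega)
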